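-- pv_equiv track=rewrite | github.com/labuwx/progpuzzles | rosalind/subo/main.py | count
-- ===== SOURCE A (Python) =====
-- def count(s, p):
--     mmt = 4
--     s += '_' * mmt
--     c = 0
--     for i in range(len(s) - len(p) + 1):
--         mm = 0
--         for j in range(len(p)):
--             if s[i + j] != p[j]:
--                 mm += 1
--             if mm > mmt:
--                 break
--         if mm <= mmt:
--             c += 1
--
--     return c
-- ===== SOURCE B (Python) =====
-- def count(s, p):
--     # Columnwise (loop-interchanged) rewrite: one mismatch-counter array over all
--     # start positions, updated per pattern character; no per-position inner scan.
--     t = s + '____'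
--     width = len(t) - len(p) + 1
--     mm = [0] * max(width, 0)
--     for j, pc in enumerate(p):
--         mm = [v + (t[i + j] != pc) for i, v in enumerate(mm)]
--     return sum(v <= 4 for v in mm)
-- ===== Notes on version B (the rewrite author's own statement) =====
-- stated objective: alternative
-- what changed: Replaces the per-position inner mismatch scan with early break by a loop interchange: one counter array over all start positions, updated once per pattern character, then a final count of entries <= 4.
import Mathlib
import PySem

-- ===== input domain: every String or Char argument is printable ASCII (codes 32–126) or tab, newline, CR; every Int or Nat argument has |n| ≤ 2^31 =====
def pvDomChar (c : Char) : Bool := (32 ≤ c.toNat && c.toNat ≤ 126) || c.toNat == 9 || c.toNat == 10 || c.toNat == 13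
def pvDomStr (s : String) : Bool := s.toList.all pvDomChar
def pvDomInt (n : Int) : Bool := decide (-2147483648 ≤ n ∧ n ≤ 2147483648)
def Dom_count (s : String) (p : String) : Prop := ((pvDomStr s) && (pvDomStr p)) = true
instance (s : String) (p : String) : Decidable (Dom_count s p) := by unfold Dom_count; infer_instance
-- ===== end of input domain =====

-- B replaces A's per-position inner scan (with early break) by a loop interchange over
-- the pattern characters maintaining one mismatch-counter array; same cost, different structure.

-- ===== PORT A =====
-- inner 'for j in range(len(p)):' loop of A, with its 'break' on mm > 4
-- (indices i+j and j are always in range here, so comparing the pyGet? options is exact)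
def countInner (t pl : List Char) (i : Int) : List Int → Int → Int
  | [], mm => mm
  | j :: js, mm =>
    let mm' := if PySem.List.pyGet? t (i + j) ≠ PySem.List.pyGet? pl j then mm + 1 else mm
    if mm' > 4 then mm' else countInner t pl i js mm'

def count (s : String) (p : String) : Int :=
  let t := s.toList ++ ['_', '_', '_', '_']
  (PySem.List.pyRange 0 ((t.length : Int) - (p.toList.length : Int) + 1) 1).foldl
    (fun c i =>
      let mm := countInner t p.toList i (PySem.List.pyRange 0 (p.toList.length : Int) 1) 0
      if mm ≤ 4 then c + 1 else c) 0

-- ===== PORT B =====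
def count_alt (s : String) (p : String) : Int :=
  let t := s.toList ++ ['_', '_', '_', '_']
  let width : Int := (t.length : Int) - (p.toList.length : Int) + 1
  let mm0 : List Int := List.replicate (max width 0).toNat 0
  let mm := (PySem.List.enumerate p.toList).foldl
    (fun mm jp =>
      (PySem.List.enumerate mm).map
        (fun iv => iv.2 + (if PySem.List.pyGet? t (iv.1 + jp.1) ≠ some jp.2 then 1 else 0)))
    mm0
  mm.foldl (fun c v => c + (if v ≤ 4 then 1 else 0)) 0

-- ===== PRECONDITION & SPEC =====
def Spec_count (s : String) (p : String) (out : Int) : Prop := out = count_alt s p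
instance (s : String) (p : String) (out : Int) : Decidable (Spec_count s p out) := by unfold Spec_count; infer_instance

-- ===== CLAIM (what is proved, stated in full; the proofs are below) =====
def Claim_equal_count : Prop := ∀ (s : String) (p : String), Dom_count s p → Spec_count s p (count s p)

-- ===== LEMMAS AND PROOFS =====

-- mismatch indicator for one (index, pattern char) pair at start position i
def pvInd (t : List Char) (i : Int) (jp : Int × Char) : Int :=
  if PySem.List.pyGet? t (i + jp.1) ≠ some jp.2 then 1 else 0

theorem pvInd_nonneg (t : List Char) (i : Int) (jp : Int × Char) : 0 ≤ pvInd t i jp := by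
  unfold pvInd; split <;> omega

theorem pvSum_nonneg (t : List Char) (i : Int) (e : List (Int × Char)) :
    0 ≤ (e.map (pvInd t i)).sum := by
  apply List.sum_nonneg; intro x hx
  obtain ⟨jp, _, rfl⟩ := List.mem_map.mp hx
  exact pvInd_nonneg t i jp

-- A's inner loop decides "total mismatches ≤ 4" despite the break
theorem countInner_le_iff (t pl : List Char) (i : Int) (e : List (Int × Char))
    (h : ∀ jp ∈ e, PySem.List.pyGet? pl jp.1 = some jp.2) (mm : Int) :
    (countInner t pl i (e.map (·.1)) mm ≤ 4 ↔ mm + (e.map (pvInd t i)).sum ≤ 4) := by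
  induction e generalizing mm with
  | nil => simp [countInner]
  | cons jp e ih =>
    have hjp := h jp (List.mem_cons_self)
    have htail : ∀ q ∈ e, PySem.List.pyGet? pl q.1 = some q.2 :=
      fun q hq => h q (List.mem_cons_of_mem _ hq)
    have hs := pvSum_nonneg t i e
    simp only [List.map_cons, countInner, hjp, List.sum_cons]
    by_cases hc : PySem.List.pyGet? t (i + jp.1) ≠ some jp.2
    · simp only [pvInd, if_pos hc]
      by_cases hb : mm + 1 > 4
      · rw [if_pos hb]; omega
      · rw [if_neg hb, ih htail]; omega
    · simp only [pvInd, hc, if_false]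
      by_cases hb : mm > 4
      · rw [if_pos hb]; omega
      · rw [if_neg hb, ih htail]; omega

-- composing an index-map with another index-map (B's repeated comprehension)
theorem pvEnumMap_comp (mm : List Int) (a : Int) (f g : Int → Int → Int) :
    (PySem.List.enumerate ((PySem.List.enumerate mm a).map (fun iv => g iv.1 iv.2)) a).map
        (fun iv => f iv.1 iv.2)
      = (PySem.List.enumerate mm a).map (fun iv => f iv.1 (g iv.1 iv.2)) := by
  induction mm generalizing a with
  | nil => simp [PySem.List.enumerate_nil]
  | cons v mm ih => simp [PySem.List.enumerate_cons, ih]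

-- B's outer fold computed pointwise
theorem pvFold_eq (t : List Char) (e : List (Int × Char)) (mm : List Int) :
    e.foldl
      (fun mm jp =>
        (PySem.List.enumerate mm).map
          (fun iv => iv.2 + (if PySem.List.pyGet? t (iv.1 + jp.1) ≠ some jp.2 then 1 else 0)))
      mm
    = (PySem.List.enumerate mm).map (fun iv => iv.2 + ((e.map (pvInd t iv.1)).sum)) := by
  induction e generalizing mm with
  | nil =>
    simp only [List.foldl_nil, List.map_nil, List.sum_nil, add_zero]
    conv_rhs => rw [show (fun iv : Int × Int => iv.2) = Prod.snd from rfl]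
    rw [PySem.List.map_snd_enumerate]
  | cons jp e ih =>
    rw [List.foldl_cons, ih]
    rw [pvEnumMap_comp mm 0 (fun i v => v + (e.map (pvInd t i)).sum)
          (fun i v => v + (if PySem.List.pyGet? t (i + jp.1) ≠ some jp.2 then 1 else 0))]
    simp only [List.map_cons, List.sum_cons]
    congr 1; funext iv; simp [pvInd]; ring

-- the two programs agree, stated over the shared padded list t
theorem pvMain (t pl : List Char) :
    (PySem.List.pyRange 0 ((t.length : Int) - (pl.length : Int) + 1) 1).foldl
      (fun (c : Int) i =>
        if countInner t pl i (PySem.List.pyRange 0 (pl.length : Int) 1) 0 ≤ 4 then c + 1 else c) 0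
    = ((PySem.List.enumerate pl).foldl
        (fun mm jp =>
          (PySem.List.enumerate mm).map
            (fun iv => iv.2 + (if PySem.List.pyGet? t (iv.1 + jp.1) ≠ some jp.2 then 1 else 0)))
        (List.replicate (max ((t.length : Int) - (pl.length : Int) + 1) 0).toNat (0 : Int))).foldl
        (fun c v => c + (if v ≤ 4 then 1 else 0)) 0 := by
  have hh : ∀ jp ∈ PySem.List.enumerate pl, PySem.List.pyGet? pl jp.1 = some jp.2 := by
    intro jp hjp
    rw [PySem.List.mem_enumerate_iff] at hjp
    obtain ⟨k, hk, rfl⟩ := hjp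
    simp [hk]
  rw [pvFold_eq]
  rw [List.foldl_map]
  rw [PySem.List.enumerate_eq_map_pyRange
        (xs := List.replicate (max ((t.length : Int) - (pl.length : Int) + 1) 0).toNat (0 : Int))
        (d := 0)]
  rw [List.foldl_map]
  simp only [PySem.List.len, List.length_replicate]
  by_cases hw : 0 ≤ (t.length : Int) - (pl.length : Int) + 1
  · have hc : ((max ((t.length : Int) - (pl.length : Int) + 1) 0).toNat : Int)
        = (t.length : Int) - (pl.length : Int) + 1 := by omega
    rw [hc]
    apply PySem.List.foldl_congr_mem
    intro acc i hi
    rw [PySem.List.mem_pyRange_one] at hi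
    dsimp only
    have hgd : PySem.List.pyGetD
        (List.replicate (max ((t.length : Int) - (pl.length : Int) + 1) 0).toNat (0 : Int)) i 0 = 0 := by
      rw [PySem.List.pyGetD_of_nonneg _ _ hi.1]
      simp [List.getD, List.getElem?_replicate]
      split_ifs <;> simp
    rw [hgd]
    have hS := countInner_le_iff t pl i (PySem.List.enumerate pl) hh 0
    rw [PySem.List.map_fst_enumerate] at hS
    simp only [zero_add] at hS ⊢
    split_ifs with h1 h2 h3 <;> omega
  · have h1 : PySem.List.pyRange 0 ((t.length : Int) - (pl.length : Int) + 1) 1 = [] :=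
      PySem.List.pyRange_one_eq_nil (by omega)
    have h2 : (max ((t.length : Int) - (pl.length : Int) + 1) 0).toNat = 0 := by omega
    rw [h1, h2]
    simp

theorem count_eq_alt (s p : String) : count s p = count_alt s p := by
  simp only [count, count_alt]
  exact pvMain (s.toList ++ ['_', '_', '_', '_']) p.toList

-- ===== VERDICT (by name: the statement is the Claim_ definition above) =====
theorem count_spec : Claim_equal_count := by
  intro s p _
  unfold Spec_count
  exact count_eq_alt s p
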